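-- pv_equiv track=rewrite | github.com/llyfn/problem-solving | LeetCode/Medium/3761-minimum-absolute-distance-between-mirror-pairs/3761-minimum-absolute-distance-between-mirror-pairs.py | minMirrorPairDistance
-- ===== SOURCE A (Python) =====
-- from typing import List
--
-- def minMirrorPairDistance(nums: List[int]) -> int:
--     def rev(x):
--         return int(str(x)[::-1])
--
--     last = {}
--     ans = float('inf')
--     for j, v in enumerate(nums):
--         if v in last:
--             ans = min(ans, j - last[v])
--         r = rev(v)
--         if r in last:
--             if last[r] < j:
--                 pass
--         last[rev(v)] = j
--     return ans if ans != float('inf') else -1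
-- ===== SOURCE B (Python) =====
-- from typing import List
--
-- def minMirrorPairDistance(nums: List[int]) -> int:
--     def rev(x):
--         return int(str(x)[::-1])
--
--     revs = [rev(x) for x in nums]
--     ans = None
--     for j in range(len(nums)):
--         for i in range(j):
--             if revs[i] == nums[j]:
--                 d = j - i
--                 if ans is None or d < ans:
--                     ans = d
--     return ans if ans is not None else -1
-- ===== Notes on version B (the rewrite author's own statement) =====
-- stated objective: alternative
-- what changed: Replaces A's single-pass hash map of latest reversed values with a precomputed list of reversed values followed by an all-pairs nested scan taking the minimum j-i over pairs with rev(nums[i]) == nums[j].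
import Mathlib
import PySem

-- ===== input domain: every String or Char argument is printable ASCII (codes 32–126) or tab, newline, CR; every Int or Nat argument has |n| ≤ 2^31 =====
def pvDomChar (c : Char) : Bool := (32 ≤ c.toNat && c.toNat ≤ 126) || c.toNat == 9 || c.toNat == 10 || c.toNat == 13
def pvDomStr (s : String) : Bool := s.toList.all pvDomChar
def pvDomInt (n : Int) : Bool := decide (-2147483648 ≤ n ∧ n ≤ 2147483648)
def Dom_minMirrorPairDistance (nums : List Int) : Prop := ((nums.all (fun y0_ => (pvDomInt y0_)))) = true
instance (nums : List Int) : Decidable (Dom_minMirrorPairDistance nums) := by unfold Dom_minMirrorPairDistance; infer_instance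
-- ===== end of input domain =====

-- B replaces A's one-pass hash map of latest reversed values with a precomputed
-- reversed-value list and an all-pairs nested scan (alternative decomposition, not faster).

-- ===== PORT A =====
-- rev(x) = int(str(x)[::-1]); total via getD 0, exact on Pre_ (all elements ≥ 0,
-- where Python's int() succeeds); shared by both ports as both Pythons define it.
def pyRev (x : Int) : Int :=
  (PySem.Int.ofChars? (PySem.Int.toChars x).reverse).getD 0

def stepA (st : PySem.Dict Int Int × Option Int) (jv : Int × Int) :
    PySem.Dict Int Int × Option Int :=
  let last := st.1
  let ans := st.2
  let j := jv.1
  let v := jv.2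
  let ans :=
    match last.get? v with
    | some i => some (match ans with | some a => min a (j - i) | none => j - i)
    | none => ans
  -- 'r = rev(v); if r in last: if last[r] < j: pass' computes r and does nothing
  let _r := pyRev v
  (last.insert (pyRev v) j, ans)

def minMirrorPairDistance (nums : List Int) : Int :=
  let st := (PySem.List.enumerate nums 0).foldl stepA (PySem.Dict.empty, none)
  match st.2 with
  | some a => a
  | none => -1

-- ===== PORT B =====
def innerB (revs nums : List Int) (j : Nat) (ans : Option Int) : Option Int :=
  (List.range j).foldl
    (fun ans i =>
      if revs.getD i 0 = nums.getD j 0 then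
        let d : Int := (j : Int) - (i : Int)
        match ans with
        | none => some d
        | some a => if d < a then some d else some a
      else ans) ans

def minMirrorPairDistance_alt (nums : List Int) : Int :=
  let revs := nums.map pyRev
  let ans := (List.range nums.length).foldl (fun ans j => innerB revs nums j ans) none
  match ans with
  | some a => a
  | none => -1

-- ===== PRECONDITION & SPEC =====
-- Pre_ excludes lists containing a negative element: there Python's rev builds a
-- string ending in '-' and int() raises ValueError (in A and in B alike).
def Pre_minMirrorPairDistance (nums : List Int) : Prop := ∀ x ∈ nums, 0 ≤ x
instance (nums : List Int) : Decidable (Pre_minMirrorPairDistance nums) := by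
  unfold Pre_minMirrorPairDistance; infer_instance

def pvWitness_minMirrorPairDistance : List Int := [12, 21, 3]

def Spec_minMirrorPairDistance (nums : List Int) (out : Int) : Prop := out = minMirrorPairDistance_alt nums
instance (nums : List Int) (out : Int) : Decidable (Spec_minMirrorPairDistance nums out) := by unfold Spec_minMirrorPairDistance; infer_instance

-- ===== CLAIM (what is proved, stated in full; the proofs are below) =====
def Claim_equal_minMirrorPairDistance : Prop := ∀ (nums : List Int), Dom_minMirrorPairDistance nums → Pre_minMirrorPairDistance nums → Spec_minMirrorPairDistance nums (minMirrorPairDistance nums)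

-- ===== LEMMAS AND PROOFS =====

-- latest index i < m with pyRev (nums[i]) = k, as stored in A's dict
def lastIdx (nums : List Int) : Nat → Int → Option Int
  | 0, _ => none
  | m + 1, k => if pyRev (nums.getD m 0) = k then some (m : Int) else lastIdx nums m k

lemma lastIdx_lt {nums : List Int} {m : Nat} {k i : Int}
    (h : lastIdx nums m k = some i) : 0 ≤ i ∧ i < (m : Int) := by
  induction m with
  | zero => simp [lastIdx] at h
  | succ m ih =>
    unfold lastIdx at h
    split at h
    · cases h; constructor <;> omega
    · have := ih h; omega

lemma getD_map_pyRev (nums : List Int) {m : Nat} (h : m < nums.length) :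
    (nums.map pyRev).getD m 0 = pyRev (nums.getD m 0) := by
  rw [List.getD_eq_getElem?_getD, List.getElem?_map, List.getD_eq_getElem?_getD,
    List.getElem?_eq_getElem h]
  simp

lemma enumerate_eq_map_range_gen (xs : List Int) :
    ∀ s : Int, PySem.List.enumerate xs s =
      (List.range xs.length).map (fun (j : Nat) => (s + (j : Int), xs.getD j 0)) := by
  induction xs with
  | nil => intro s; simp [PySem.List.enumerate_nil]
  | cons x xs ih =>
    intro s
    rw [PySem.List.enumerate_cons, ih (s + 1)]
    simp only [List.length_cons, List.range_succ_eq_map, List.map_map, List.map_cons]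
    congr 1
    · simp
    · refine List.map_congr_left fun j _ => ?_
      simp only [Function.comp, Nat.succ_eq_add_one, List.getD_cons_succ, Prod.mk.injEq]
      exact ⟨by push_cast; ring, trivial⟩

lemma enumerate_eq_map_range (nums : List Int) :
    PySem.List.enumerate nums 0 =
      (List.range nums.length).map (fun (j : Nat) => ((j : Int), nums.getD j 0)) := by
  rw [enumerate_eq_map_range_gen nums 0]
  simp

-- the inner loop of B up to bound m computes the min distance to the LATEST matching index
lemma inner_aux (nums : List Int) (j : Nat) (hj : j ≤ nums.length) :
    ∀ (m : Nat), m ≤ j → ∀ (ans : Option Int),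
    (List.range m).foldl
      (fun ans i =>
        if (nums.map pyRev).getD i 0 = nums.getD j 0 then
          let d : Int := (j : Int) - (i : Int)
          match ans with
          | none => some d
          | some a => if d < a then some d else some a
        else ans) ans =
      match lastIdx nums m (nums.getD j 0) with
      | none => ans
      | some i => some (match ans with
          | none => (j : Int) - i
          | some a => min ((j : Int) - i) a) := by
  intro m
  induction m with
  | zero => intro _ ans; simp [lastIdx]
  | succ m ih =>
    intro hm ans
    rw [List.range_succ, List.foldl_append, ih (by omega) ans, List.foldl_cons, List.foldl_nil]
    rw [getD_map_pyRev nums (by omega)]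
    have hsucc : lastIdx nums (m + 1) (nums.getD j 0) =
        if pyRev (nums.getD m 0) = nums.getD j 0 then some (m : Int)
        else lastIdx nums m (nums.getD j 0) := rfl
    rw [hsucc]
    by_cases hrev : pyRev (nums.getD m 0) = nums.getD j 0
    · rw [if_pos hrev, if_pos hrev]
      rcases hli : lastIdx nums m (nums.getD j 0) with _ | i
      · cases ans with
        | none => rfl
        | some a =>
          dsimp only; rw [min_def]; split_ifs <;> simp only [Option.some.injEq] <;> omega
      · obtain ⟨hi0, him⟩ := lastIdx_lt hli
        cases ans with
        | none =>
          dsimp only; rw [if_pos (show (j : Int) - (m : Int) < (j : Int) - i by omega)]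
        | some a =>
          dsimp only; simp only [min_def]; split_ifs <;> simp only [Option.some.injEq] <;> omega
    · rw [if_neg hrev, if_neg hrev]

lemma inner_eq (nums : List Int) (j : Nat) (hj : j ≤ nums.length) (ans : Option Int) :
    innerB (nums.map pyRev) nums j ans =
      match lastIdx nums j (nums.getD j 0) with
      | none => ans
      | some i => some (match ans with
          | none => (j : Int) - i
          | some a => min ((j : Int) - i) a) := by
  unfold innerB
  exact inner_aux nums j hj j le_rfl ans

lemma main_inv (nums : List Int) (m : Nat) (hm : m ≤ nums.length) :
    (∀ k, ((List.range m).foldl (fun st (j : Nat) => stepA st ((j : Int), nums.getD j 0))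
        (PySem.Dict.empty, none)).1.get? k = lastIdx nums m k) ∧
    ((List.range m).foldl (fun st (j : Nat) => stepA st ((j : Int), nums.getD j 0))
        (PySem.Dict.empty, none)).2 =
      (List.range m).foldl (fun ans j => innerB (nums.map pyRev) nums j ans) none := by
  induction m with
  | zero => simp [PySem.Dict.get?_empty, lastIdx]
  | succ m ih =>
    obtain ⟨ih1, ih2⟩ := ih (by omega)
    rw [List.range_succ, List.foldl_append, List.foldl_append,
      List.foldl_cons, List.foldl_nil, List.foldl_cons, List.foldl_nil]
    constructor
    · intro k
      show ((_ : PySem.Dict Int Int).insert (pyRev (nums.getD m 0)) (m : Int)).get? k = _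
      rw [PySem.Dict.get?_insert]
      unfold lastIdx
      by_cases hk : k = pyRev (nums.getD m 0)
      · rw [if_pos hk, if_pos hk.symm]
      · rw [if_neg hk, if_neg (fun h => hk h.symm), ih1 k]
    · show (match _ with
        | some i => some (match _ with | some a => min a ((m : Int) - i) | none => (m : Int) - i)
        | none => _) = innerB (nums.map pyRev) nums m _
      rw [inner_eq nums m (by omega), ih1 (nums.getD m 0), ih2]
      cases lastIdx nums m (nums.getD m 0) with
      | none => rfl
      | some i =>
        cases (List.range m).foldl (fun ans j => innerB (nums.map pyRev) nums j ans)
            (none : Option Int) with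
        | none => rfl
        | some a => simp [min_comm]

-- ===== VERDICT (by name: the statement is the Claim_ definition above) =====
theorem minMirrorPairDistance_spec : Claim_equal_minMirrorPairDistance := by
  intro nums _ _
  unfold Spec_minMirrorPairDistance minMirrorPairDistance minMirrorPairDistance_alt
  rw [enumerate_eq_map_range, List.foldl_map]
  dsimp only
  rw [(main_inv nums nums.length le_rfl).2]
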